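-- pv_equiv track=rewrite | github.com/younesStrittmatter/sweetPeaBush | packages/sweetExtract/src/sweetExtract/steps/llm_complete_sb_program_from_draft.py | _examples_for_stimuli
-- ===== SOURCE A (Python) =====
-- from typing import Any, Dict, List, Type, Union, Optional, Tuple
--
-- _EXAMPLE_KEY_ALIASES = {
--     "HtmlKeyboardResponse": "htmlkeyboardresponse",
--     "MultiChoiceSurvey": "multichoicesurvey",
--     "LikertSurvey": "likertsurvey",
--     "RandomObjectKinematogram": "randomobjectkinematogram",
--     "RandomDotPatterns": "randomdotpatterns",
--     "HtmlChoice": "htmlchoice",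
-- }
--
-- def _examples_for_stimuli(stimuli: List[str], examples: Dict[str, Any], max_chars: int = 5000) -> str:
--     """
--     Return nicely formatted code blocks for only the used stimuli.
--     """
--     ordered: List[tuple[str, str]] = []
--     seen_keys = set()
--     for cls in stimuli:
--         key = _EXAMPLE_KEY_ALIASES.get(cls, cls).lower()
--         if key not in seen_keys:
--             ordered.append((cls, key))
--             seen_keys.add(key)
--
--     blocks: List[str] = []
--     total = 0
--
--     for display_name, key in ordered:
--         raw = examples.get(key, [])
--         ex_list = raw if isinstance(raw, list) else [raw]
--
--         for ex in ex_list: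
--             if not isinstance(ex, dict):
--                 continue
--             code = (ex.get("code") or "").strip()
--             if not code:
--                 continue
--
--             chunk = f"#### Example: {display_name}\n```python\n{code}\n```"
--             if total + len(chunk) > max_chars:
--                 remaining = max_chars - total
--                 if remaining > 0:
--                     blocks.append(chunk[:remaining])
--                     total = max_chars
--                 break
--
--             blocks.append(chunk)
--             total += len(chunk)
--
--         if total >= max_chars:
--             break
--
--     return "\n\n".join(blocks).strip() or "(no examples available for these classes)"
-- ===== SOURCE B (Python) =====
-- from typing import Any, Dict, List
--
-- _EXAMPLE_KEY_ALIASES = {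
--     "HtmlKeyboardResponse": "htmlkeyboardresponse",
--     "MultiChoiceSurvey": "multichoicesurvey",
--     "LikertSurvey": "likertsurvey",
--     "RandomObjectKinematogram": "randomobjectkinematogram",
--     "RandomDotPatterns": "randomdotpatterns",
--     "HtmlChoice": "htmlchoice",
-- }
--
--
-- def _chunks_for(display_name, raw):
--     """All formatted example blocks for one stimulus class, in order."""
--     ex_list = raw if isinstance(raw, list) else [raw]
--     out = []
--     for ex in ex_list:
--         if not isinstance(ex, dict):
--             continue
--         code = (ex.get("code") or "").strip()
--         if code:
--             out.append(f"#### Example: {display_name}\n```python\n{code}\n```")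
--     return out
--
--
-- def _examples_for_stimuli(stimuli: List[str], examples: Dict[str, Any], max_chars: int = 5000) -> str:
--     # Phase 1: build the full ordered, deduplicated chunk list (no budget logic here).
--     chunks: List[str] = []
--     seen = set()
--     for cls in stimuli:
--         key = _EXAMPLE_KEY_ALIASES.get(cls, cls).lower()
--         if key in seen:
--             continue
--         seen.add(key)
--         chunks.extend(_chunks_for(cls, examples.get(key, [])))
--
--     # Phase 2: consume the character budget once over the flat chunk list.
--     blocks: List[str] = []
--     total = 0
--     for chunk in chunks:
--         if total + len(chunk) <= max_chars:
--             blocks.append(chunk)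
--             total += len(chunk)
--         else:
--             if max_chars - total > 0:
--                 blocks.append(chunk[:max_chars - total])
--             break
--
--     return "\n\n".join(blocks).strip() or "(no examples available for these classes)"
-- ===== Notes on version B (the rewrite author's own statement) =====
-- stated objective: alternative
-- what changed: A interleaves dedup, formatting and the character budget in one nested loop with two break levels; B is split into a build phase that produces the full ordered deduplicated list of formatted chunks and a separate single flat consume phase that spends the character budget (append while it fits, truncate once, stop).
import Mathlib
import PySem

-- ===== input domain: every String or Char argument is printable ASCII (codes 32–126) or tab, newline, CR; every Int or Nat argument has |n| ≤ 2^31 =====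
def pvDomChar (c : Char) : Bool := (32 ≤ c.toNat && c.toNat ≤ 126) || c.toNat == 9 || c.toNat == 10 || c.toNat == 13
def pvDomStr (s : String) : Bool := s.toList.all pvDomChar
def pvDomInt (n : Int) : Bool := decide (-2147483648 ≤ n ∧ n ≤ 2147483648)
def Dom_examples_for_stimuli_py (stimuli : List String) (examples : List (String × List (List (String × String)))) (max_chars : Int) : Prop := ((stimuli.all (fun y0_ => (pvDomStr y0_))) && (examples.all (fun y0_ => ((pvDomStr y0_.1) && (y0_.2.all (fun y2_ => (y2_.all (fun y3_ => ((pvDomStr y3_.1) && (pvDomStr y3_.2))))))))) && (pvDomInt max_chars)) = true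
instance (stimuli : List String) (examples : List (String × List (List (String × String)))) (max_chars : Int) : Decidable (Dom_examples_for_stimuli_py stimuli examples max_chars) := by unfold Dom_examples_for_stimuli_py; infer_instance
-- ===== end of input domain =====

-- B re-decomposes A's single interleaved dedup+budget nested loop into a build phase (the full ordered
-- deduplicated chunk list) followed by a separate budget-consume phase over that flat list; same return value.

-- ===== PORT A =====
-- _EXAMPLE_KEY_ALIASES (module constant, shared by both ports)
def pvAliases : PySem.Dict String String := PySem.Dict.mk
  [("HtmlKeyboardResponse", "htmlkeyboardresponse"),
   ("MultiChoiceSurvey", "multichoicesurvey"),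
   ("LikertSurvey", "likertsurvey"),
   ("RandomObjectKinematogram", "randomobjectkinematogram"),
   ("RandomDotPatterns", "randomdotpatterns"),
   ("HtmlChoice", "htmlchoice")]

-- key = _EXAMPLE_KEY_ALIASES.get(cls, cls).lower()
def pvKeyOf (cls : String) : String := PySem.Str.lower (pvAliases.getD cls cls)

-- code = (ex.get("code") or "").strip()  — 'or ""' maps None to ""; '"" or ""' is also "", so getD "" is exact
def pvCodeOf (ex : List (String × String)) : String :=
  PySem.Str.strip (((PySem.Dict.mk ex).get? "code").getD "")

-- chunk = f"#### Example: {display_name}\n```python\n{code}\n```"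
def pvChunk (display : String) (code : String) : String :=
  "#### Example: " ++ display ++ "\n```python\n" ++ code ++ "\n```"

-- A's first loop: ordered/seen_keys (acc carries the growing 'ordered' list, seen is the Python set)
def pvOrderedA (stimuli : List String) (seen : PySem.Set String) (acc : List (String × String)) :
    List (String × String) :=
  match stimuli with
  | [] => acc
  | cls :: rest =>
    let key := pvKeyOf cls
    if seen.contains key then pvOrderedA rest seen acc
    else pvOrderedA rest (seen.add key) (acc ++ [(cls, key)])

-- A's inner 'for ex in ex_list' loop, with its break (under the type convention ex_list is always a
-- list of dicts, so Python's isinstance guards are identically true)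
def pvInnerA (display : String) (exs : List (List (String × String)))
    (blocks : List String) (total max_chars : Int) : List String × Int :=
  match exs with
  | [] => (blocks, total)
  | ex :: rest =>
    if pvCodeOf ex = "" then pvInnerA display rest blocks total max_chars
    else
      if total + PySem.Str.len (pvChunk display (pvCodeOf ex)) > max_chars then
        if max_chars - total > 0 then
          (blocks ++ [PySem.Str.slice (pvChunk display (pvCodeOf ex)) none (some (max_chars - total))],
           max_chars)
        else (blocks, total)
      else pvInnerA display rest (blocks ++ [pvChunk display (pvCodeOf ex)])
             (total + PySem.Str.len (pvChunk display (pvCodeOf ex))) max_chars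

-- A's outer 'for display_name, key in ordered' loop with its 'if total >= max_chars: break'
def pvOuterA (ordered : List (String × String))
    (examples : PySem.Dict String (List (List (String × String))))
    (blocks : List String) (total max_chars : Int) : List String :=
  match ordered with
  | [] => blocks
  | (display, key) :: rest =>
    let p := pvInnerA display (examples.getD key []) blocks total max_chars
    if p.2 ≥ max_chars then p.1 else pvOuterA rest examples p.1 p.2 max_chars

def examples_for_stimuli_py (stimuli : List String) (examples : List (String × List (List (String × String)))) (max_chars : Int) : String :=
  let ordered := pvOrderedA stimuli PySem.Set.empty []
  let blocks := pvOuterA ordered (PySem.Dict.mk examples) [] 0 max_chars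
  let s := PySem.Str.strip (PySem.Str.join "\n\n" blocks)
  if s == "" then "(no examples available for these classes)" else s

-- ===== PORT B =====
-- Source B _chunks_for: all formatted blocks of one stimulus class (a filtering map over the examples)
def pvChunksFor (display : String) (exs : List (List (String × String))) : List String :=
  exs.filterMap (fun ex =>
    if pvCodeOf ex = "" then none else some (pvChunk display (pvCodeOf ex)))

-- Source B phase 1: one pass over stimuli; dedup via the set, extend with that class's chunks
def pvBuildB (stimuli : List String) (examples : PySem.Dict String (List (List (String × String))))
    (seen : PySem.Set String) (chunks : List String) : List String :=
  match stimuli with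
  | [] => chunks
  | cls :: rest =>
    let key := pvKeyOf cls
    if seen.contains key then pvBuildB rest examples seen chunks
    else pvBuildB rest examples (seen.add key) (chunks ++ pvChunksFor cls (examples.getD key []))

-- Source B phase 2: consume the character budget once over the flat chunk list
def pvConsume (chunks : List String) (blocks : List String) (total max_chars : Int) : List String :=
  match chunks with
  | [] => blocks
  | c :: rest =>
    if total + PySem.Str.len c ≤ max_chars then
      pvConsume rest (blocks ++ [c]) (total + PySem.Str.len c) max_chars
    else if max_chars - total > 0 then blocks ++ [PySem.Str.slice c none (some (max_chars - total))]
    else blocks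

def examples_for_stimuli_py_alt (stimuli : List String) (examples : List (String × List (List (String × String)))) (max_chars : Int) : String :=
  let chunks := pvBuildB stimuli (PySem.Dict.mk examples) PySem.Set.empty []
  let s := PySem.Str.strip (PySem.Str.join "\n\n" (pvConsume chunks [] 0 max_chars))
  if s == "" then "(no examples available for these classes)" else s

-- ===== PRECONDITION & SPEC =====
def Spec_examples_for_stimuli_py (stimuli : List String) (examples : List (String × List (List (String × String)))) (max_chars : Int) (out : String) : Prop := out = examples_for_stimuli_py_alt stimuli examples max_chars
instance (stimuli : List String) (examples : List (String × List (List (String × String)))) (max_chars : Int) (out : String) : Decidable (Spec_examples_for_stimuli_py stimuli examples max_chars out) := by unfold Spec_examples_for_stimuli_py; infer_instance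

-- ===== CLAIM (what is proved, stated in full; the proofs are below) =====
def Claim_equal_examples_for_stimuli_py : Prop := ∀ (stimuli : List String) (examples : List (String × List (List (String × String)))) (max_chars : Int), Dom_examples_for_stimuli_py stimuli examples max_chars → Spec_examples_for_stimuli_py stimuli examples max_chars (examples_for_stimuli_py stimuli examples max_chars)

-- ===== LEMMAS AND PROOFS =====

-- the chunks of A's remaining ordered list, flattened: the bridge between the two decompositions
def pvChunksOrd (examples : PySem.Dict String (List (List (String × String))))
    (ordered : List (String × String)) : List String :=
  ordered.flatMap (fun p => pvChunksFor p.1 (examples.getD p.2 []))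

theorem pvChunk_len_pos (d c : String) : 0 < PySem.Str.len (pvChunk d c) := by
  unfold pvChunk
  rw [PySem.Str.len_append, PySem.Str.len_append, PySem.Str.len_append, PySem.Str.len_append]
  have h1 : PySem.Str.len "#### Example: " = 14 := by decide
  have h2 : (0:Int) ≤ PySem.Str.len d := by rw [PySem.Str.len_eq]; exact_mod_cast Nat.zero_le _
  have h3 : (0:Int) ≤ PySem.Str.len "\n```python\n" := by decide
  have h4 : (0:Int) ≤ PySem.Str.len c := by rw [PySem.Str.len_eq]; exact_mod_cast Nat.zero_le _
  have h5 : (0:Int) ≤ PySem.Str.len "\n```" := by decide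
  omega

theorem pvChunksFor_len_pos (d : String) (exs : List (List (String × String)))
    (c : String) (hc : c ∈ pvChunksFor d exs) : 0 < PySem.Str.len c := by
  unfold pvChunksFor at hc
  obtain ⟨ex, _, hex⟩ := List.mem_filterMap.mp hc
  by_cases h : pvCodeOf ex = ""
  · rw [if_pos h] at hex; cases hex
  · rw [if_neg h] at hex
    exact (Option.some.inj hex) ▸ pvChunk_len_pos d (pvCodeOf ex)

theorem pvChunksOrd_len_pos (examples : PySem.Dict String (List (List (String × String))))
    (ordered : List (String × String)) (c : String) (hc : c ∈ pvChunksOrd examples ordered) :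
    0 < PySem.Str.len c := by
  unfold pvChunksOrd at hc
  obtain ⟨p, _, hp⟩ := List.mem_flatMap.mp hc
  exact pvChunksFor_len_pos p.1 _ c hp

-- A's ordered-builder: the accumulator factors out
theorem pvOrderedA_acc (stimuli : List String) (seen : PySem.Set String)
    (acc : List (String × String)) :
    pvOrderedA stimuli seen acc = acc ++ pvOrderedA stimuli seen [] := by
  induction stimuli generalizing seen acc with
  | nil => simp [pvOrderedA]
  | cons cls rest ih =>
    unfold pvOrderedA
    by_cases h : (PySem.Set.contains seen (pvKeyOf cls)) = true
    · simp only [h, if_true]; exact ih seen acc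
    · simp only [h, if_false, Bool.false_eq_true]
      rw [ih _ (acc ++ [(cls, pvKeyOf cls)]), ih _ ([] ++ [(cls, pvKeyOf cls)])]
      simp

-- B's build phase computes exactly the flattened chunks of A's ordered list
theorem pvBuildB_eq_chunksOrd (stimuli : List String)
    (examples : PySem.Dict String (List (List (String × String))))
    (seen : PySem.Set String) (chunks : List String) :
    pvBuildB stimuli examples seen chunks
      = chunks ++ pvChunksOrd examples (pvOrderedA stimuli seen []) := by
  induction stimuli generalizing seen chunks with
  | nil => simp [pvBuildB, pvOrderedA, pvChunksOrd]
  | cons cls rest ih =>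
    unfold pvBuildB pvOrderedA
    by_cases h : (PySem.Set.contains seen (pvKeyOf cls)) = true
    · simp only [h, if_true]; exact ih seen chunks
    · simp only [h, if_false, Bool.false_eq_true]
      rw [ih, pvOrderedA_acc rest _ ([] ++ [(cls, pvKeyOf cls)])]
      simp [pvChunksOrd, List.append_assoc]

-- stopped budget: once total ≥ max_chars the consume phase adds nothing (all chunks are nonempty)
theorem pvConsume_stop (chunks : List String) (blocks : List String) (total max_chars : Int)
    (h : max_chars ≤ total) (hp : ∀ c ∈ chunks, 0 < PySem.Str.len c) :
    pvConsume chunks blocks total max_chars = blocks := by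
  cases chunks with
  | nil => rfl
  | cons c rest =>
    have hc : 0 < PySem.Str.len c := hp c (by simp)
    have h1 : ¬ (total + PySem.Str.len c ≤ max_chars) := by omega
    have h2 : ¬ (max_chars - total > 0) := by omega
    unfold pvConsume
    rw [if_neg h1, if_neg h2]

-- key lemma: A's inner loop vs consuming this class's chunks followed by any positive-length rest
theorem pvInnerA_consume (display : String) (exs : List (List (String × String)))
    (blocks more : List String) (total max_chars : Int)
    (hp : ∀ c ∈ more, 0 < PySem.Str.len c) :
    pvConsume (pvChunksFor display exs ++ more) blocks total max_chars
      = (if max_chars ≤ (pvInnerA display exs blocks total max_chars).2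
         then (pvInnerA display exs blocks total max_chars).1
         else pvConsume more (pvInnerA display exs blocks total max_chars).1
                (pvInnerA display exs blocks total max_chars).2 max_chars) := by
  induction exs generalizing blocks total with
  | nil =>
    simp only [pvChunksFor, List.filterMap_nil, List.nil_append, pvInnerA]
    by_cases h : max_chars ≤ total
    · rw [if_pos h, pvConsume_stop more blocks total max_chars h hp]
    · rw [if_neg h]
  | cons ex rest ih =>
    by_cases hc : pvCodeOf ex = ""
    · have e1 : pvChunksFor display (ex :: rest) = pvChunksFor display rest := by
        unfold pvChunksFor
        rw [List.filterMap_cons, if_pos hc]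
      have e2 : pvInnerA display (ex :: rest) blocks total max_chars
          = pvInnerA display rest blocks total max_chars := by
        conv_lhs => unfold pvInnerA
        rw [if_pos hc]
      rw [e1, e2]
      exact ih blocks total
    · have e1 : pvChunksFor display (ex :: rest)
          = pvChunk display (pvCodeOf ex) :: pvChunksFor display rest := by
        unfold pvChunksFor
        rw [List.filterMap_cons, if_neg hc]
      by_cases hfit : total + PySem.Str.len (pvChunk display (pvCodeOf ex)) > max_chars
      · have h1 : ¬ (total + PySem.Str.len (pvChunk display (pvCodeOf ex)) ≤ max_chars) := by omega
        have e2 : pvInnerA display (ex :: rest) blocks total max_chars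
            = (if max_chars - total > 0
               then (blocks ++ [PySem.Str.slice (pvChunk display (pvCodeOf ex)) none
                       (some (max_chars - total))], max_chars)
               else (blocks, total)) := by
          conv_lhs => unfold pvInnerA
          rw [if_neg hc, if_pos hfit]
        by_cases hrem : max_chars - total > 0
        · rw [e1, e2, if_pos hrem, List.cons_append]
          conv_lhs => unfold pvConsume
          rw [if_neg h1, if_pos hrem]
          simp
        · have h2 : max_chars ≤ total := by omega
          rw [e1, e2, if_neg hrem, List.cons_append]
          conv_lhs => unfold pvConsume
          rw [if_neg h1, if_neg hrem]
          simp [h2]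
      · have hfit' : total + PySem.Str.len (pvChunk display (pvCodeOf ex)) ≤ max_chars := by omega
        have e2 : pvInnerA display (ex :: rest) blocks total max_chars
            = pvInnerA display rest (blocks ++ [pvChunk display (pvCodeOf ex)])
                (total + PySem.Str.len (pvChunk display (pvCodeOf ex))) max_chars := by
          conv_lhs => unfold pvInnerA
          rw [if_neg hc, if_neg hfit]
        rw [e1, e2, List.cons_append]
        conv_lhs => unfold pvConsume
        rw [if_pos hfit']
        exact ih (blocks ++ [pvChunk display (pvCodeOf ex)])
          (total + PySem.Str.len (pvChunk display (pvCodeOf ex)))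

-- A's outer loop equals B's consume phase over the flattened chunks
theorem pvOuterA_eq_consume (ordered : List (String × String))
    (examples : PySem.Dict String (List (List (String × String))))
    (blocks : List String) (total max_chars : Int) :
    pvOuterA ordered examples blocks total max_chars
      = pvConsume (pvChunksOrd examples ordered) blocks total max_chars := by
  induction ordered generalizing blocks total with
  | nil => simp [pvOuterA, pvChunksOrd, pvConsume]
  | cons p rest ih =>
    obtain ⟨display, key⟩ := p
    have hp : ∀ c ∈ pvChunksOrd examples rest, 0 < PySem.Str.len c :=
      fun c hc => pvChunksOrd_len_pos examples rest c hc
    have hco : pvChunksOrd examples ((display, key) :: rest)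
        = pvChunksFor display (examples.getD key []) ++ pvChunksOrd examples rest := by
      simp [pvChunksOrd]
    rw [hco, pvInnerA_consume display (examples.getD key []) blocks
      (pvChunksOrd examples rest) total max_chars hp]
    unfold pvOuterA
    by_cases h : max_chars ≤ (pvInnerA display (examples.getD key []) blocks total max_chars).2
    · simp [h]
    · have h' : ¬ ((pvInnerA display (examples.getD key []) blocks total max_chars).2 ≥ max_chars) := h
      simp only [h, ite_false]
      exact ih _ _

-- ===== VERDICT (by name: the statement is the Claim_ definition above) =====
theorem examples_for_stimuli_py_spec : Claim_equal_examples_for_stimuli_py := by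
  intro stimuli examples max_chars _
  unfold Spec_examples_for_stimuli_py examples_for_stimuli_py examples_for_stimuli_py_alt
  simp only [pvBuildB_eq_chunksOrd, pvOuterA_eq_consume, List.nil_append]
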